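-- pv_equiv track=rewrite | github.com/Ricodonto/Project2 | input_scripts/car_route_input.py | generate_str
-- ===== SOURCE A (Python) =====
-- def generate_str(data):
--     values = []
--     for i in range(len(data)):
--         if i < len(data)-1:
--             value = f"{data[i]},"
--         else:
--             value = f"{data[i]};"
--         values.append(value)
--     return values
-- ===== SOURCE B (Python) =====
-- def generate_str(data):
--     if not data:
--         return []
--     return [f"{x}," for x in data[:-1]] + [f"{data[-1]};"]
-- ===== Notes on version B (the rewrite author's own statement) =====
-- stated objective: simpler
-- what changed: Replaces the indexed loop with a per-iteration branch by a head/tail split: a comprehension comma-suffixes data[:-1] and the last element gets the semicolon separately.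
import Mathlib
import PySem

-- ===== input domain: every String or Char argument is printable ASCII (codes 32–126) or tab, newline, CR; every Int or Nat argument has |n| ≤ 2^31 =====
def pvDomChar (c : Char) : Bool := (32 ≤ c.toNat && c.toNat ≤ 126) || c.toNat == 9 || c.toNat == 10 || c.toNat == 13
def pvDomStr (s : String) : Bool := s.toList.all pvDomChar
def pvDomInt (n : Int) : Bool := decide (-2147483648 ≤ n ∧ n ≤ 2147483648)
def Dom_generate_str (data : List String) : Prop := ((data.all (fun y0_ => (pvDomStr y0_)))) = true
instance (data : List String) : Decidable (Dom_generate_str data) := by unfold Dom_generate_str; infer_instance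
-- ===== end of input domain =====

-- B replaces A's indexed loop with a per-iteration branch by a head/tail split
-- (comma-suffix data[:-1] by comprehension, semicolon the last element); objective: simpler.

-- ===== PORT A =====
def generate_str (data : List String) : List String :=
  (PySem.List.pyRange 0 (data.length : Int) 1).foldl
    (fun values i =>
      let value :=
        if i < (data.length : Int) - 1 then PySem.List.pyGetD data i "" ++ ","
        else PySem.List.pyGetD data i "" ++ ";"
      values ++ [value]) []

-- ===== PORT B =====
def generate_str_alt (data : List String) : List String :=
  if data = [] then []
  else
    (PySem.List.slice data none (some (-1))).map (fun x => x ++ ",")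
      ++ [PySem.List.pyGetD data (-1) "" ++ ";"]

-- ===== PRECONDITION & SPEC =====
def Spec_generate_str (data : List String) (out : List String) : Prop := out = generate_str_alt data
instance (data : List String) (out : List String) : Decidable (Spec_generate_str data out) := by unfold Spec_generate_str; infer_instance

-- ===== CLAIM (what is proved, stated in full; the proofs are below) =====
def Claim_equal_generate_str : Prop := ∀ (data : List String), Dom_generate_str data → Spec_generate_str data (generate_str data)

-- ===== LEMMAS AND PROOFS =====
theorem generate_str_eq_map (data : List String) :
    generate_str data =
      (PySem.List.pyRange 0 (data.length : Int) 1).map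
        (fun i => if i < (data.length : Int) - 1 then PySem.List.pyGetD data i "" ++ ","
                  else PySem.List.pyGetD data i "" ++ ";") := by
  unfold generate_str
  exact PySem.List.foldl_append_singleton_eq_map ..

-- ===== VERDICT (by name: the statement is the Claim_ definition above) =====
theorem generate_str_spec : Claim_equal_generate_str := by
  intro data _
  unfold Spec_generate_str generate_str_alt
  rw [generate_str_eq_map]
  induction data using List.reverseRecOn with
  | nil => simp [PySem.List.pyRange]
  | append_singleton xs x ih =>
    clear ih
    rw [if_neg (by simp), PySem.List.slice_to_neg_one, PySem.List.pyGetD_neg_one_append_singleton,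
        List.dropLast_concat]
    rw [PySem.List.pyRange_one]
    have hn : (((xs ++ [x]).length : Int) - 0).toNat = xs.length + 1 := by
      simp
    rw [hn, List.range_succ, List.map_append, List.map_append]
    congr 1
    · rw [List.map_map]
      apply List.ext_getElem (by simp)
      intro k hk hk'
      simp only [List.getElem_map, List.getElem_range, Function.comp_apply]
      rw [if_pos (by simp at hk ⊢; omega)]
      rw [show ((0:Int) + (k:Int)) = ((k:Nat):Int) by omega, PySem.List.pyGetD_natCast]
      simp at hk
      rw [List.getD_eq_getElem _ _ (by simp; omega), List.getElem_append_left hk]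
    · simp only [List.map_cons, List.map_nil]
      rw [if_neg (by simp), show ((0:Int) + (xs.length:Int)) = ((xs.length:Nat):Int) by omega,
        PySem.List.pyGetD_natCast, List.getD_eq_getElem _ _ (by simp)]
      simp
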